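-- pv_equiv track=rewrite | github.com/caopeng86/CRF-DATA-PREPARE | main.py | do_convert
-- ===== SOURCE A (Python) =====
-- def do_convert(text, labeled):
--     i = 0
--     result = list()
--     while i < len(text):
--         entity = 'O'
--         if (labeled and int(labeled[0][2]) == i):
--             for j in range(int(labeled[0][3]) - int(labeled[0][2])):
--                 if j == 0:
--                     entity = 'B-' + str(labeled[0][1]).upper()
--                 else:
--                     entity = 'I-' + str(labeled[0][1]).upper()
--                 line = text[i] + ' ' + entity
--                 result.append(line)
--                 i += 1
--             else:
--                 del labeled[0]
--         else:
--             line = text[i] + ' ' + entity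
--             i += 1
--             result.append(line)
--     return result
-- ===== SOURCE B (Python) =====
-- def do_convert(text, labeled):
--     # Label-driven rewrite: consume spans from `labeled` (mutating it like A does),
--     # filling 'O' gaps between spans, then tag the trailing tail with 'O'.
--     result = []
--     i = 0
--     while labeled:
--         start = int(labeled[0][2])
--         end = int(labeled[0][3])
--         if start >= len(text):
--             break
--         tag = str(labeled[0][1]).upper()
--         while i < start:
--             result.append(text[i] + ' O')
--             i += 1
--         for j in range(start, end):
--             result.append(text[j] + ' ' + ('B-' if j == start else 'I-') + tag)
--         i = max(i, end)
--         del labeled[0]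
--     while i < len(text):
--         result.append(text[i] + ' O')
--         i += 1
--     return result
-- ===== Notes on version B (the rewrite author's own statement) =====
-- stated objective: alternative
-- what changed: B is driven by the label list (parse each span once, bulk-fill the 'O' gap before it, emit its B-/I- lines, then one trailing 'O' fill), replacing A's per-character while loop that re-parses int(labeled[0][2]) at every text position.
-- outside the precondition, e.g. on do_convert('a', [['x', 't', '0', '1'], ['zz']]): A returns ['a B-T'], B raises IndexError
import Mathlib
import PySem

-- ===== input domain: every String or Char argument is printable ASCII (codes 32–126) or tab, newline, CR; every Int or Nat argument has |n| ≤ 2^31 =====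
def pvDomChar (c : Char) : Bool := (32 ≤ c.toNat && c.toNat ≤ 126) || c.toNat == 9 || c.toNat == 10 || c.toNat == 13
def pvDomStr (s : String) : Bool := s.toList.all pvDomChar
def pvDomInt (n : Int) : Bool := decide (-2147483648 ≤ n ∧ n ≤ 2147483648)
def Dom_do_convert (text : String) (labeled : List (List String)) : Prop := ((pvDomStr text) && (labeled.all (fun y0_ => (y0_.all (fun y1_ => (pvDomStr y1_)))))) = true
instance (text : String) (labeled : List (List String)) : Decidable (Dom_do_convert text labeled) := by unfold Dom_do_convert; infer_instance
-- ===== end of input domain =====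

-- B re-implements do_convert label-driven (consume spans, bulk-fill 'O' gaps) instead of
-- A's per-character loop; equivalence is about the RETURN value (both also pop consumed
-- labels off `labeled` in Python; under Pre_ they leave `labeled` in the same state).

-- ===== PORT A =====
-- the inner 'for j in range(int(labeled[0][3]) - int(labeled[0][2]))' loop of A:
-- emits one tagged line per step, reading labeled[0][1] and text[i] each iteration
-- (none = the Python IndexError on a missing field / an index past the end of text).
def aSpan (cs : List Char) (l : List String) (i : Nat) (cnt : Nat) (first : Bool)
    (acc : List String) : Option (List String) :=
  match cnt with
  | 0 => some acc
  | c + 1 =>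
    match PySem.List.pyGet? l 1, cs[i]? with
    | some tag, some ch =>
        aSpan cs l (i + 1) c false
          (acc ++ [String.ofList (ch :: ' ' :: ((if first then ['B', '-'] else ['I', '-']) ++
            PySem.Chars.upper tag.toList))])
    | _, _ => none

-- A's 'while i < len(text)' loop; on a raising step (failed int()/index) the port
-- returns the accumulator (dead code inside Pre_do_convert).
def aLoop (cs : List Char) (labeled : List (List String)) (i : Nat) (acc : List String) :
    List String :=
  if h : i < cs.length then
    match labeled with
    | [] => aLoop cs [] (i + 1) (acc ++ [String.ofList (cs[i] :: ' ' :: ['O'])])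
    | l :: rest =>
      match (PySem.List.pyGet? l 2).bind PySem.Int.ofStr? with
      | none => acc
      | some s =>
        if s = (i : Int) then
          match (PySem.List.pyGet? l 3).bind PySem.Int.ofStr? with
          | none => acc
          | some e =>
            match aSpan cs l i (e - s).toNat true acc with
            | none => acc
            | some acc' => aLoop cs rest (i + (e - s).toNat) acc'
        else
          aLoop cs (l :: rest) (i + 1) (acc ++ [String.ofList (cs[i] :: ' ' :: ['O'])])
  else acc
termination_by cs.length - i + labeled.length
decreasing_by all_goals simp_all; omega

def do_convert (text : String) (labeled : List (List String)) : List String :=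
  aLoop text.toList labeled 0 []

-- ===== PORT B =====
-- Source B's 'while i < …: result.append(text[i] + " O"); i += 1' fill between i and j
-- (an out-of-range text[i] — Python's IndexError — cuts the list; unreachable inside Pre_).
def oFill (cs : List Char) (i : Nat) (j : Nat) : List String :=
  if i < j then
    match cs[i]? with
    | some ch => String.ofList (ch :: [' ', 'O']) :: oFill cs (i + 1) j
    | none => []
  else []
termination_by j - i

-- one line of Source B's 'for j in range(start, end)' ("" = the Python IndexError, unreachable inside Pre_)
def bLine (cs : List Char) (s : Int) (tagU : List Char) (j : Int) : String :=
  match PySem.List.pyGet? cs j with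
  | some ch => String.ofList (ch :: ' ' :: ((if j = s then ['B', '-'] else ['I', '-']) ++ tagU))
  | none => ""

-- Source B's 'while labeled' loop: returns (result so far, i); stops on break / a raising step
def bConsume (cs : List Char) (labeled : List (List String)) (i : Nat) (acc : List String) :
    List String × Nat :=
  match labeled with
  | [] => (acc, i)
  | l :: rest =>
    match (PySem.List.pyGet? l 2).bind PySem.Int.ofStr?,
          (PySem.List.pyGet? l 3).bind PySem.Int.ofStr? with
    | some s, some e =>
      if (cs.length : Int) ≤ s then (acc, i)
      else
        match PySem.List.pyGet? l 1 with
        | none => (acc, i)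
        | some tag =>
          bConsume cs rest (max i e.toNat)
            ((acc ++ oFill cs i s.toNat) ++
              (PySem.List.pyRange s e 1).map (bLine cs s (PySem.Chars.upper tag.toList)))
    | _, _ => (acc, i)

def do_convert_alt (text : String) (labeled : List (List String)) : List String :=
  let cs := text.toList
  let r := bConsume cs labeled 0 []
  r.1 ++ oFill cs r.2 cs.length

-- ===== PRECONDITION & SPEC =====
-- Pre_ restricts to the natural domain of the conversion: every label record examined has
-- ≥ 4 fields with int-parseable start/end, and the labels form in-order, non-overlapping
-- spans inside the text (records from the first span starting past the end of the text
-- onward only need to be well formed, neither program reads beyond them). Outside it A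
-- either raises (short records, unparseable ints, a span running past the text) or — for
-- out-of-order / overlapping spans — silently leaves labels stuck and tags the tail 'O',
-- while B tags each well-formed span where it says it is; see the cited examples.
def spansOk (n : Int) (pos : Int) : List (List String) → Bool
  | [] => true
  | l :: rest =>
    match (PySem.List.pyGet? l 2).bind PySem.Int.ofStr?,
          (PySem.List.pyGet? l 3).bind PySem.Int.ofStr? with
    | some s, some e =>
      decide (4 ≤ l.length) &&
        (if n ≤ s then true
         else decide (pos ≤ s ∧ s ≤ e ∧ e ≤ n) && spansOk n e rest)
    | _, _ => false

def Pre_do_convert (text : String) (labeled : List (List String)) : Prop :=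
  spansOk (text.toList.length : Int) 0 labeled = true

instance (text : String) (labeled : List (List String)) : Decidable (Pre_do_convert text labeled) := by
  unfold Pre_do_convert; infer_instance

def pvWitness_do_convert : String × List (List String) :=
  ("rob is here", [["0", "per", "0", "3"], ["1", "loc", "7", "11"]])

def Spec_do_convert (text : String) (labeled : List (List String)) (out : List String) : Prop := out = do_convert_alt text labeled
instance (text : String) (labeled : List (List String)) (out : List String) : Decidable (Spec_do_convert text labeled out) := by unfold Spec_do_convert; infer_instance

-- ===== CLAIM (what is proved, stated in full; the proofs are below) =====
def Claim_equal_do_convert : Prop := ∀ (text : String) (labeled : List (List String)), Dom_do_convert text labeled → Pre_do_convert text labeled → Spec_do_convert text labeled (do_convert text labeled)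

-- ===== LEMMAS AND PROOFS =====

theorem oFill_step (cs : List Char) (i j : Nat) (h : i < cs.length) (hij : i < j) :
    oFill cs i j = String.ofList (cs[i] :: [' ', 'O']) :: oFill cs (i + 1) j := by
  rw [oFill]; simp [hij, List.getElem?_eq_getElem h]

theorem oFill_stop (cs : List Char) (i j : Nat) (h : ¬ i < j) : oFill cs i j = [] := by
  rw [oFill]; simp [h]

theorem aLoop_nil (cs : List Char) :
    ∀ (d i : Nat) (acc : List String), cs.length - i ≤ d →
      aLoop cs [] i acc = acc ++ oFill cs i cs.length := by
  intro d
  induction d with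
  | zero =>
    intro i acc h
    have hi : ¬ i < cs.length := by omega
    rw [aLoop, oFill]; simp [hi]
  | succ d ih =>
    intro i acc h
    by_cases hi : i < cs.length
    · rw [aLoop]; simp only [hi, dite_true]
      rw [ih (i + 1) _ (by omega), oFill_step cs i cs.length hi hi]
      simp
    · rw [aLoop, oFill]; simp [hi]

theorem aLoop_stuck (cs : List Char) (l : List String) (rest : List (List String)) (s : Int)
    (hs : (PySem.List.pyGet? l 2).bind PySem.Int.ofStr? = some s)
    (hn : (cs.length : Int) ≤ s) :
    ∀ (d i : Nat) (acc : List String), cs.length - i ≤ d →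
      aLoop cs (l :: rest) i acc = acc ++ oFill cs i cs.length := by
  intro d
  induction d with
  | zero =>
    intro i acc h
    have hi : ¬ i < cs.length := by omega
    rw [aLoop, oFill]; simp [hi]
  | succ d ih =>
    intro i acc h
    by_cases hi : i < cs.length
    · have hne : ¬ s = (i : Int) := by
        have : (i : Int) < (cs.length : Int) := by exact_mod_cast hi
        omega
      rw [aLoop]; simp only [hi, dite_true, hs, hne, if_false]
      rw [ih (i + 1) _ (by omega), oFill_step cs i cs.length hi hi]
      simp
    · rw [aLoop, oFill]; simp [hi]

theorem aLoop_advance (cs : List Char) (l : List String) (rest : List (List String)) (s : Int)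
    (hs : (PySem.List.pyGet? l 2).bind PySem.Int.ofStr? = some s) (j : Nat)
    (hj : (j : Int) = s) (hjlen : j ≤ cs.length) :
    ∀ (d i : Nat) (acc : List String), j - i ≤ d → i ≤ j →
      aLoop cs (l :: rest) i acc = aLoop cs (l :: rest) j (acc ++ oFill cs i j) := by
  intro d
  induction d with
  | zero =>
    intro i acc h hij
    have : i = j := by omega
    subst this
    rw [oFill_stop cs i i (by omega)]; simp
  | succ d ih =>
    intro i acc h hij
    rcases Nat.eq_or_lt_of_le hij with rfl | hlt
    · rw [oFill_stop cs i i (by omega)]; simp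
    · have hi : i < cs.length := by omega
      have hne : ¬ s = (i : Int) := by
        have : (i : Int) < (j : Int) := by exact_mod_cast hlt
        omega
      rw [aLoop]; simp only [hi, dite_true, hs, hne, if_false]
      rw [ih (i + 1) _ (by omega) (by omega), oFill_step cs i j hi hlt]
      simp

theorem aSpan_eq (cs : List Char) (l : List String) (tag : String)
    (htag : PySem.List.pyGet? l 1 = some tag) (s : Int) :
    ∀ (cnt j : Nat) (first : Bool) (acc : List String),
      j + cnt ≤ cs.length → s ≤ (j : Int) → first = decide ((j : Int) = s) →
      aSpan cs l j cnt first acc =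
        some (acc ++ (PySem.List.pyRange (j : Int) ((j : Int) + (cnt : Int)) 1).map
          (bLine cs s (PySem.Chars.upper tag.toList))) := by
  intro cnt
  induction cnt with
  | zero =>
    intro j first acc _ _ _
    rw [aSpan, PySem.List.pyRange_one_eq_nil (by omega)]
    simp
  | succ c ih =>
    intro j first acc hlen hsj hfirst
    have hjlt : j < cs.length := by omega
    rw [aSpan]
    simp only [htag, List.getElem?_eq_getElem hjlt]
    have hline : bLine cs s (PySem.Chars.upper tag.toList) (j : Int)
        = String.ofList (cs[j] :: ' ' :: ((if first then ['B', '-'] else ['I', '-']) ++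
            PySem.Chars.upper tag.toList)) := by
      unfold bLine
      rw [PySem.List.pyGet?_natCast, List.getElem?_eq_getElem hjlt]
      subst hfirst
      by_cases hjs : (j : Int) = s <;> simp [hjs]
    have hcons : PySem.List.pyRange ((j : Int)) ((j : Int) + ((c + 1 : Nat) : Int)) 1
        = ((j : Int)) :: PySem.List.pyRange (((j + 1 : Nat) : Int)) (((j + 1 : Nat) : Int) + ((c : Nat) : Int)) 1 := by
      rw [PySem.List.pyRange_one_cons (by push_cast; omega)]
      have e1 : ((j : Int)) + 1 = ((j + 1 : Nat) : Int) := by push_cast; ring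
      have e2 : (j : Int) + ((c + 1 : Nat) : Int) = ((j + 1 : Nat) : Int) + ((c : Nat) : Int) := by
        push_cast; ring
      rw [e1, e2]
    rw [hcons, List.map_cons, hline,
      ih (j + 1) false _ (by omega) (by push_cast; omega)
        (by
          have hne : ¬ ((j : Int) + 1 = s) := by omega
          push_cast
          simp [hne])]
    simp

theorem loop_eq (cs : List Char) :
    ∀ (labeled : List (List String)) (i : Nat) (acc : List String),
      spansOk (cs.length : Int) (i : Int) labeled = true →
      aLoop cs labeled i acc =
        (bConsume cs labeled i acc).1 ++ oFill cs (bConsume cs labeled i acc).2 cs.length := by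
  intro labeled
  induction labeled with
  | nil =>
    intro i acc _
    rw [bConsume]
    exact aLoop_nil cs (cs.length - i) i acc (le_refl _)
  | cons l rest ih =>
    intro i acc h
    rw [spansOk] at h
    cases hp2 : (PySem.List.pyGet? l 2).bind PySem.Int.ofStr? with
    | none => rw [hp2] at h; simp at h
    | some s =>
    cases hp3 : (PySem.List.pyGet? l 3).bind PySem.Int.ofStr? with
    | none => rw [hp2, hp3] at h; simp at h
    | some e =>
    rw [hp2, hp3] at h
    simp only [Bool.and_eq_true, decide_eq_true_eq] at h
    obtain ⟨hlen4, h⟩ := h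
    by_cases hns : (cs.length : Int) ≤ s
    · rw [bConsume]; simp only [hp2, hp3, hns, if_true]
      exact aLoop_stuck cs l rest s hp2 hns (cs.length - i) i acc (le_refl _)
    · rw [if_neg hns] at h
      simp only [Bool.and_eq_true, decide_eq_true_eq] at h
      obtain ⟨⟨his, hse, hen⟩, hrest⟩ := h
      -- the head label fires at position s
      have hs0 : 0 ≤ s := le_trans (by positivity) his
      set j : Nat := s.toNat with hjdef
      have hj : (j : Int) = s := Int.toNat_of_nonneg hs0
      have hjlen : j < cs.length := by omega
      have hij : i ≤ j := by omega
      have htag : PySem.List.pyGet? l 1 = some l[1] := by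
        simpa using PySem.List.pyGet?_ofNat (xs := l) 1 (by omega)
      rw [aLoop_advance cs l rest s hp2 j hj (by omega) (j - i) i acc (le_refl _) hij]
      rw [aLoop, dif_pos hjlen]
      simp only [hp2, hp3]
      rw [if_pos (show s = (j : Int) by omega)]
      simp only [aSpan_eq cs l l[1] htag s (e - s).toNat j true (acc ++ oFill cs i j) (by omega)
        (by omega) (by simp [hj])]
      have hcnt : (j : Int) + (((e - s).toNat : Int)) = e := by omega
      have hjej : j + (e - s).toNat = e.toNat := by omega
      rw [ih (j + (e - s).toNat) _ (by rw [hjej]; rw [show ((e.toNat : Nat) : Int) = e by omega]; exact hrest)]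
      rw [bConsume]
      simp only [hp2, hp3, hns, if_false, htag]
      have hmax : max i e.toNat = e.toNat := by omega
      rw [hjej, hmax, hcnt, hj]

-- ===== VERDICT (by name: the statement is the Claim_ definition above) =====
theorem do_convert_spec : Claim_equal_do_convert := by
  intro text labeled _ hpre
  unfold Spec_do_convert do_convert do_convert_alt
  exact loop_eq text.toList labeled 0 [] hpre
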